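-- pv_equiv track=rewrite | github.com/shae128/CL-unipi | app1.py | vocabCal
-- ===== SOURCE A (Python) =====
-- def vocabCal(tokens, interval):
--
--     # List of Vocabulary sizes
--     vocabSize = []
--     # Tokens size
--     tokenSize = []
--
--     lastPart = 0
--
--     # Iterating in tokens' list by interval
--     for tokenNum in range (interval, len(tokens), interval):
--         vocabList = set(tokens[:tokenNum])
--         tokenSize.append(tokenNum)
--         vocabSize.append(len(vocabList))
--         lastPart += tokenNum
--
--     # If tokens' number is not dividable by interval
--     # Then add also the last part which
-- #    if lastPart != len(tokens):
-- #        vocabList = set(tokens)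
-- #        tokenSize.append(len(tokens))
-- #        vocabSize.append(len(vocabList))
--
--     finaleList = [tokenSize, vocabSize]
--
--     return finaleList
-- ===== SOURCE B (Python) =====
-- def vocabCal(tokens, interval):
--     # One pass: keep a running set and add only the newly revealed slice at
--     # each checkpoint, instead of rebuilding set(tokens[:t]) from scratch.
--     tokenSize = []
--     vocabSize = []
--     if interval > 0:
--         seen = set()
--         t = interval
--         while t < len(tokens):
--             seen.update(tokens[t - interval:t])
--             tokenSize.append(t)
--             vocabSize.append(len(seen))
--             t += interval
--     return [tokenSize, vocabSize]
-- ===== Notes on version B (the rewrite author's own statement) =====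
-- stated objective: alternative
-- what changed: B keeps one running set and adds only the newly revealed slice of tokens at each checkpoint (a while-loop single pass), instead of rebuilding set(tokens[:t]) from scratch for every checkpoint; intended as faster, but a timing run measured only 1.21x at its largest size.
import Mathlib
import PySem

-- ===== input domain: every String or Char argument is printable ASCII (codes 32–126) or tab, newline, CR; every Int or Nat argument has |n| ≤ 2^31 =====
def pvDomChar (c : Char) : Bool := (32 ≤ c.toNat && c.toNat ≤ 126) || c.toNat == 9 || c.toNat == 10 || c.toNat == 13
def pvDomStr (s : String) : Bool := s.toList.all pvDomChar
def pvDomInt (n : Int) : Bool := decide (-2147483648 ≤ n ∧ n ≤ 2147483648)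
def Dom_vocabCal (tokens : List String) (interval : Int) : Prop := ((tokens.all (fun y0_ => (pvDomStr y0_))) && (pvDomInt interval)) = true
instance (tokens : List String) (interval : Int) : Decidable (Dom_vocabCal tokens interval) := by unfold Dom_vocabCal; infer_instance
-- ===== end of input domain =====

-- B replaces A's per-checkpoint rebuild of set(tokens[:t]) by one running set updated
-- with only the newly revealed slice (objective: alternative single-pass algorithm).


-- ===== PORT A =====
def vocabCal (tokens : List String) (interval : Int) : List (List Int) :=
  -- state: (tokenSize, vocabSize, lastPart)
  let st := (PySem.List.pyRange interval (tokens.length : Int) interval).foldl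
    (fun (acc : List Int × List Int × Int) tokenNum =>
      let vocabList := PySem.Set.ofList (PySem.List.slice tokens none (some tokenNum))
      (acc.1 ++ [tokenNum], acc.2.1 ++ [(vocabList.length : Int)], acc.2.2 + tokenNum))
    ([], [], 0)
  [st.1, st.2.1]

-- ===== PORT B =====
-- B's while loop: t runs interval, 2*interval, … while t < len(tokens); the running set
-- 'seen' is extended with the slice tokens[t-interval:t] only.
def vocabAltLoop (tokens : List String) (interval : Int) (hpos : 0 < interval)
    (t : Int) (seen : PySem.Set String) (ts vs : List Int) : List Int × List Int :=
  if h : t < (tokens.length : Int) then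
    let seen' := PySem.Set.update seen (PySem.List.slice tokens (some (t - interval)) (some t))
    vocabAltLoop tokens interval hpos (t + interval) seen' (ts ++ [t]) (vs ++ [(seen'.length : Int)])
  else (ts, vs)
termination_by ((tokens.length : Int) - t).toNat
decreasing_by omega

def vocabCal_alt (tokens : List String) (interval : Int) : List (List Int) :=
  if h : 0 < interval then
    let r := vocabAltLoop tokens interval h interval PySem.Set.empty [] []
    [r.1, r.2]
  else [[], []]

-- ===== PRECONDITION & SPEC =====
-- Pre_ excludes exactly interval = 0, where A's range(interval, len, interval) raises ValueError.
def Pre_vocabCal (tokens : List String) (interval : Int) : Prop := interval ≠ 0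
instance (tokens : List String) (interval : Int) : Decidable (Pre_vocabCal tokens interval) := by
  unfold Pre_vocabCal; infer_instance
def pvWitness_vocabCal : List String × Int := (["a", "b", "a"], 1)

def Spec_vocabCal (tokens : List String) (interval : Int) (out : List (List Int)) : Prop := out = vocabCal_alt tokens interval
instance (tokens : List String) (interval : Int) (out : List (List Int)) : Decidable (Spec_vocabCal tokens interval out) := by unfold Spec_vocabCal; infer_instance

-- ===== CLAIM (what is proved, stated in full; the proofs are below) =====
def Claim_equal_vocabCal : Prop := ∀ (tokens : List String) (interval : Int), Dom_vocabCal tokens interval → Pre_vocabCal tokens interval → Spec_vocabCal tokens interval (vocabCal tokens interval)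

-- ===== LEMMAS AND PROOFS =====

-- vocabulary size of the length-x prefix (proof-side abbreviation)
def prefVocab (tokens : List String) (x : Int) : Int :=
  ((PySem.Set.ofList (tokens.take x.toNat)).length : Int)

theorem pyRange_pos_nil (a b s : Int) (hs : 0 < s) (h : b ≤ a) :
    PySem.List.pyRange a b s = [] := by
  rw [PySem.List.pyRange_of_pos a b hs, if_neg (by omega)]
  simp

theorem pyRange_pos_cons (a b s : Int) (hs : 0 < s) (h : a < b) :
    PySem.List.pyRange a b s = a :: PySem.List.pyRange (a + s) b s := by
  rw [PySem.List.pyRange_of_pos a b hs, PySem.List.pyRange_of_pos (a + s) b hs]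
  have hinner : (if a + s < b then ((b - (a + s) + s - 1) / s).toNat else 0)
      = ((b - a - 1) / s).toNat := by
    split_ifs with h2
    · congr 1; ring_nf
    · have hlt : b - a - 1 < s := by omega
      have h0 : 0 ≤ b - a - 1 := by omega
      have := Int.ediv_eq_zero_of_lt h0 hlt
      omega
  rw [hinner]
  have houter : (b - a + s - 1) = (b - a - 1) + 1 * s := by ring
  have hdiv : (b - a + s - 1) / s = (b - a - 1) / s + 1 := by
    rw [houter, Int.add_mul_ediv_right _ _ (by omega : s ≠ 0)]
  have hnn : 0 ≤ (b - a - 1) / s := Int.ediv_nonneg (by omega) (by omega)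
  rw [if_pos h, hdiv]
  have htn : ((b - a - 1) / s + 1).toNat = ((b - a - 1) / s).toNat + 1 := by omega
  rw [htn, List.range_succ_eq_map, List.map_cons, List.map_map]
  refine List.cons_eq_cons.mpr ⟨by push_cast; ring, ?_⟩
  apply List.map_congr_left
  intro k _
  simp [Function.comp]
  push_cast
  ring

theorem set_update_ofList {α : Type} [BEq α] (xs ys : List α) :
    PySem.Set.update (PySem.Set.ofList xs) ys = PySem.Set.ofList (xs ++ ys) := by
  simp [PySem.Set.ofList_eq_foldl, PySem.Set.update, List.foldl_append]

theorem altLoop_eq (tokens : List String) (s : Int) (hs : 0 < s) :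
    ∀ (k : Nat) (t : Int) (seen : PySem.Set String) (ts vs : List Int),
      ((tokens.length : Int) - t).toNat = k → s ≤ t →
      seen = PySem.Set.ofList (tokens.take (t - s).toNat) →
      vocabAltLoop tokens s hs t seen ts vs
        = (ts ++ PySem.List.pyRange t (tokens.length : Int) s,
           vs ++ (PySem.List.pyRange t (tokens.length : Int) s).map (prefVocab tokens)) := by
  intro k
  induction k using Nat.strong_induction_on with
  | _ k ih =>
    intro t seen ts vs hk hst hseen
    rw [vocabAltLoop]
    by_cases h : t < (tokens.length : Int)
    · rw [dif_pos h]
      have hsl : PySem.List.slice tokens (some (t - s)) (some t)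
          = (tokens.drop (t - s).toNat).take (t.toNat - (t - s).toNat) :=
        PySem.List.slice_toNat tokens (by omega) (by omega)
      have hseen' : PySem.Set.update seen (PySem.List.slice tokens (some (t - s)) (some t))
          = PySem.Set.ofList (tokens.take t.toNat) := by
        rw [hseen, set_update_ofList, hsl, ← List.take_add]
        congr 2
        omega
      rw [hseen']
      rw [ih (((tokens.length : Int) - (t + s)).toNat) (by omega) (t + s) _ _ _ rfl (by omega)
          (by congr 2; omega)]
      rw [pyRange_pos_cons t _ s hs h]
      simp [prefVocab]
    · rw [dif_neg h]
      rw [pyRange_pos_nil t _ s hs (by omega)]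
      simp

theorem vocabCal_eq_pos (tokens : List String) (interval : Int) (h : 0 < interval) :
    vocabCal tokens interval
      = [PySem.List.pyRange interval (tokens.length : Int) interval,
         (PySem.List.pyRange interval (tokens.length : Int) interval).map (prefVocab tokens)] := by
  unfold vocabCal
  rw [PySem.List.foldl_prod_mk (f := fun (acc : List Int) x => acc ++ [x])
      (g := fun (acc : List Int × Int) x =>
        (acc.1 ++ [((PySem.Set.ofList (PySem.List.slice tokens none (some x))).length : Int)],
         acc.2 + x))]
  rw [PySem.List.foldl_prod_mk (f := fun (acc : List Int) x =>
        acc ++ [((PySem.Set.ofList (PySem.List.slice tokens none (some x))).length : Int)])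
      (g := fun (acc : Int) x => acc + x)]
  rw [PySem.List.foldl_append_singleton_eq_self, PySem.List.foldl_append_singleton_eq_map]
  simp only [List.nil_append]
  congr 2
  apply List.map_congr_left
  intro x hx
  have hx' := (PySem.List.mem_pyRange_iff_of_pos h x).mp hx
  simp [prefVocab, PySem.List.slice_to tokens (by omega : (0:Int) ≤ x)]

-- ===== VERDICT (by name: the statement is the Claim_ definition above) =====
theorem vocabCal_spec : Claim_equal_vocabCal := by
  intro tokens interval _ hpre
  unfold Spec_vocabCal vocabCal_alt
  by_cases h : 0 < interval
  · rw [dif_pos h]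
    rw [vocabCal_eq_pos tokens interval h]
    rw [altLoop_eq tokens interval h _ interval PySem.Set.empty [] [] rfl le_rfl
        (by simp [PySem.Set.empty, PySem.Set.ofList])]
    simp
  · rw [dif_neg h]
    have hneg : interval < 0 := by
      rcases lt_trichotomy interval 0 with h' | h' | h'
      · exact h'
      · exact absurd h' hpre
      · exact absurd h' h
    unfold vocabCal
    rw [show PySem.List.pyRange interval (tokens.length : Int) interval = [] by
      simp only [PySem.List.pyRange]
      rw [if_neg (by omega)]
      split_ifs <;> simp_all <;> omega]
    rfl
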